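/- GENERATED by mk_final_copies.py from the proof of the farm's unit `imdct_step3_inner_s_loop_ld654.2` (farm:imdct_step3_inner_s_loop_ld654.2.1: Lemmas.lean) as the
   re-elaboration sweep compiled it — do not edit. -/
import Asan.CheckWalk
import Vorbis.Spec.Units.imdct_step3_inner_s_loop_ld654_2
/-
  Unit imdct_step3_inner_s_loop_ld654.2 — the body of the loop of `imdct_step3_inner_s_loop_ld654` (0x1069af … 0x106c43, C lines
  2624-2652), IN THREE PARTS, one lemma each (the walks are independent; `Proof.lean` chains them with `ReachVia.trans`):

      partA   0x1069af → 0x106aeb   loads / checks of z[-0..-3], z[-8..-11], four butterflies, eight stores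
      partB   0x106aeb → 0x106c3b   loads / checks of z[-4..-7], z[-12..-15], four butterflies, eight stores, `iter_54(z)`
      partC   0x106c3b → 0x106c47   `iter_54(z - 8)`, `z -= 16`: the loop head with `t + 1`

  TWO THINGS THE WALKS DO, and why (see NOTES.md):
  * every walk stops at the return address of each check call (`ret<k>`) and clears `w_zmm`: the walker's check fast path states
    `w_zmm : s.zmm = v.zmm`, which switches the tracking of the vector registers ON; with the 96 SSE instructions of this body the
    `Vector.set` nest makes `u_body` exponentially slow (27 s per instruction after 30 of them).
  * before each of the three INTEGER loads of a float (`mov ebp / r14d, [rbx - k]`: 0x106a5f, 0x106b5f, 0x106b8f) the memory nest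
    `w_mem` is abstracted to its footprint (`Mem.SameExcept [frame scratch, z[-15 .. 0]] v.mem s.mem`) and cleared: otherwise the
    load is read through every stack store of the nest by the side tactic (35 – 70 s per load); the floats are opaque anyway.
-/
open X86 X86.User Asan Vorbis Vorbis.Spec

set_option maxRecDepth 4000
set_option maxHeartbeats 40000000

namespace Vorbis.Spec.imdct_step3_inner_s_loop_ld654_2

/-- **A check site of the body**: the float `z[-j]`, `j ≤ 15`, of iteration `t < n'` lies in the live run `e[0 .. len)`; the
shadow is that of the entry memory (`hun0` up to the last abstraction of the memory, `hun1` since). -/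
theorem chk_z {others : List Obj} {frames : List (Nat × FrameLayout)} {len i0 t n : Nat} {ue v : State} {m0 m1 : Mem}
    (hsh : ShadowPre others frames ue)
    (hlive : LiveBytes others frames (ue.reg .rsi).toNat (4 * len))
    (hun0 : ShadowUntouched ue.mem m0) (hun1 : ShadowUntouched m0 m1)
    (hz : (v.reg .rbx).toNat + 64 * t = (ue.reg .rsi).toNat + 4 * i0)
    (htlt : t < n) (hrun : 16 * n ≤ i0 + 1) (hlen : i0 < len)
    (b : Word) (j : Nat) (hj : j ≤ 15) (hb : b.toNat + 4 * j = (v.reg .rbx).toNat) : AccSmall 4 m1 b :=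
  hlive.accSmall hsh.inv (Mem.EqOn.trans hun0 hun1) b 4 (by decide) (by omega) (by omega)

/-- **In the middle of the body** (at the code address `a`): the loop invariant of iteration `t < n'` (the pointers do not move
inside the body), and `r12 = z - 32` bytes (set at 0x1069c1, the argument of the second `iter_54`). -/
structure MidBody (u₀ : State) (others : List Obj) (frames : List (Nat × FrameLayout)) (len i0 : Nat) (ue : State)
    (ret : Word) (t : Nat) (a : Word) (v : State) : Prop where
  /-- where the machine stands -/
  rip : v.rip = a
  /-- the loop invariant -/
  loop : imdct_step3_inner_s_loop_ld654.Loop u₀ others frames len i0 ue ret t v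
  /-- the iteration runs -/
  lt : t < arg32 ue .rdi
  /-- `r12 = z - 8` floats -/
  r12 : v.reg .r12 = v.reg .rbx - 32

/-- **Part A** (0x1069af … 0x106aeb, C lines 2624-2635): the loads `z[-0 .. -3]`, `z[-8 .. -11]` with their eight checks, the first
four butterflies and their eight stores; up to the check call of `z[-4]`, where `rdi = z - 16` bytes. -/
theorem partA {Lay : Layout} (hLay : Lay.hi = 0x1000000) {μ : Microarch} (hμ : UserX.MicroOK μ) {u₀ : State}
    (hcode : HasCodeNat Lay u₀ Vorbis.L.imdct_step3_inner_s_loop_ld654.entry Vorbis.Code.code_imdct_step3_inner_s_loop_ld654.nat Vorbis.L.imdct_step3_inner_s_loop_ld654.size)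
    (hload4 : Asan.SmallCheck Lay μ Vorbis.WayInv (Vorbis.CodeOK u₀) [.rax, .rcx, .rdx] 4 Vorbis.L.__asan_load4_noabort.entry)
    {others : List Obj} {frames : List (Nat × FrameLayout)} {len i0 : Nat} {ue : State} {ret : Word} {t : Nat} {v : State}
    (hv : imdct_step3_inner_s_loop_ld654.AtBody u₀ others frames len i0 ue ret t v) :
    ReachVia Lay μ WayInv v (fun w => MidBody u₀ others frames len i0 ue ret t Vorbis.L.imdct_step3_inner_s_loop_ld654.chk10 w ∧
      w.reg .rdi = w.reg .rbx - 16) := by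
  obtain ⟨hrip, hloop, htlt⟩ := hv
  obtain ⟨hbody, hle, hz, hbase⟩ := hloop
  obtain ⟨he, hpre, hcodeok, habi, hframe, hsame, hshadow⟩ := hbody
  obtain ⟨hrsp, sret, s15, s14, s13, s12, sbp, sbx⟩ := hframe
  have he0 := he
  have hpre0 := hpre
  v_entry he
  obtain ⟨hsh, h16, hi0, hr8, hrun, hlen, hlive, hA⟩ := hpre
  have hsp := hsh.rsp
  have w_rip := hrip
  have w_rsp := hrsp
  have w_eq : Mem.EqOn Vorbis.L.textLo Vorbis.L.textHi u₀.mem v.mem := hcodeok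
  have hdf := habi.1
  have hmx := habi.2
  have hsse : SseOK v := sseOK_of_abiInv habi
  simp only [X86.User.Spec.footprint, vspec] at hsame
  have hwhere := hlive.where_ hsh.inv hsh.offText (by omega) (by omega)
  have htlt' := htlt
  rw [arg32_def] at htlt'
  have hrun' := hrun
  rw [arg32_def] at hrun'
  u_walk hcode [hμ.vendor] until [Vorbis.L.imdct_step3_inner_s_loop_ld654.ret2] span [Vorbis.L.textLo, Vorbis.L.textHi] side (v_side)
  · refine chk_z hsh hlive hshadow ?_ hz htlt hrun hlen _ 0 (by decide) (by u_omega)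
    v_untouched
  try clear w_zmm
  u_walk hcode [hμ.vendor] until [Vorbis.L.imdct_step3_inner_s_loop_ld654.ret3] span [Vorbis.L.textLo, Vorbis.L.textHi] side (v_side)
  · refine chk_z hsh hlive hshadow ?_ hz htlt hrun hlen _ 8 (by decide) (by u_omega)
    v_untouched
  try clear w_zmm
  u_walk hcode [hμ.vendor] until [Vorbis.L.imdct_step3_inner_s_loop_ld654.ret4] span [Vorbis.L.textLo, Vorbis.L.textHi] side (v_side)
  · refine chk_z hsh hlive hshadow ?_ hz htlt hrun hlen _ 1 (by decide) (by u_omega)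
    v_untouched
  try clear w_zmm
  u_walk hcode [hμ.vendor] until [Vorbis.L.imdct_step3_inner_s_loop_ld654.ret5] span [Vorbis.L.textLo, Vorbis.L.textHi] side (v_side)
  · refine chk_z hsh hlive hshadow ?_ hz htlt hrun hlen _ 9 (by decide) (by u_omega)
    v_untouched
  try clear w_zmm
  u_walk hcode [hμ.vendor] until [Vorbis.L.imdct_step3_inner_s_loop_ld654.ret6] span [Vorbis.L.textLo, Vorbis.L.textHi] side (v_side)
  · refine chk_z hsh hlive hshadow ?_ hz htlt hrun hlen _ 2 (by decide) (by u_omega)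
    v_untouched
  try clear w_zmm
  u_walk hcode [hμ.vendor] until [Vorbis.L.imdct_step3_inner_s_loop_ld654.ret7] span [Vorbis.L.textLo, Vorbis.L.textHi] side (v_side)
  · refine chk_z hsh hlive hshadow ?_ hz htlt hrun hlen _ 10 (by decide) (by u_omega)
    v_untouched
  try clear w_zmm
  u_walk hcode [hμ.vendor] until [Vorbis.L.imdct_step3_inner_s_loop_ld654.ret8] span [Vorbis.L.textLo, Vorbis.L.textHi] side (v_side)
  · refine chk_z hsh hlive hshadow ?_ hz htlt hrun hlen _ 3 (by decide) (by u_omega)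
    v_untouched
  try clear w_zmm
  -- 0x106a5f: the memory so far, abstracted to its footprint (the integer load that follows need not read through the nest)
  have hS : Mem.SameExcept [⟨(ue.reg .rsp).toNat - 176, (ue.reg .rsp).toNat - 56⟩,
      ⟨(v.reg .rbx).toNat - 60, (v.reg .rbx).toNat + 4⟩] v.mem s_106a5ar.mem := by
    u_same
  have hU : ShadowUntouched ue.mem s_106a5ar.mem := by
    have h1 : ShadowUntouched v.mem s_106a5ar.mem := by v_untouched
    exact Mem.EqOn.trans hshadow h1
  clear w_mem
  u_walk hcode [hμ.vendor] until [Vorbis.L.imdct_step3_inner_s_loop_ld654.ret9] span [Vorbis.L.textLo, Vorbis.L.textHi] side (v_side)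
  · refine chk_z hsh hlive hU ?_ hz htlt hrun hlen _ 11 (by decide) (by u_omega)
    v_untouched
  try clear w_zmm
  u_walk hcode [hμ.vendor] until [Vorbis.L.imdct_step3_inner_s_loop_ld654.chk10] span [Vorbis.L.textLo, Vorbis.L.textHi] side (v_side)
  -- 0x106aeb: the exit assertion
  have hS2 : Mem.SameExcept [⟨(ue.reg .rsp).toNat - 176, (ue.reg .rsp).toNat - 56⟩,
      ⟨(v.reg .rbx).toNat - 60, (v.reg .rbx).toNat + 4⟩] v.mem s_106ae7.mem := by
    u_same
  have hU2 : ShadowUntouched ue.mem s_106ae7.mem := by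
    have h1 : ShadowUntouched s_106a5ar.mem s_106ae7.mem := by v_untouched
    exact Mem.EqOn.trans hU h1
  clear w_mem hS
  have q0 : UInt64.ofNat (s_106ae7.mem.readLE (ue.reg .rsp) 8) = ret := by u_frame sret
  have q15 : UInt64.ofNat (s_106ae7.mem.readLE (ue.reg .rsp - 8) 8) = ue.reg .r15 := by u_frame s15
  have q14 : UInt64.ofNat (s_106ae7.mem.readLE (ue.reg .rsp - 16) 8) = ue.reg .r14 := by u_frame s14
  have q13 : UInt64.ofNat (s_106ae7.mem.readLE (ue.reg .rsp - 24) 8) = ue.reg .r13 := by u_frame s13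
  have q12 : UInt64.ofNat (s_106ae7.mem.readLE (ue.reg .rsp - 32) 8) = ue.reg .r12 := by u_frame s12
  have qbp : UInt64.ofNat (s_106ae7.mem.readLE (ue.reg .rsp - 40) 8) = ue.reg .rbp := by u_frame sbp
  have qbx : UInt64.ofNat (s_106ae7.mem.readLE (ue.reg .rsp - 48) 8) = ue.reg .rbx := by u_frame sbx
  have hsameR : Mem.SameExcept
      [⟨(ue.reg .rsp).toNat - 176, (ue.reg .rsp).toNat⟩,
       ⟨(ue.reg .rsi).toNat + 4 * (i0 + 1 - 16 * ((ue.reg .rdi).toNat % 2 ^ 32)), (ue.reg .rsi).toNat + 4 * (i0 + 1)⟩]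
      ue.mem s_106ae7.mem := by
    refine Mem.SameExcept.step_same' hsame hS2 ?_
    simp only [List.forall_mem_cons, List.not_mem_nil, false_imp_iff, implies_true, and_true, X86.User.inSpans_cons,
      X86.User.inSpans_nil, or_false]
    clear hwhere
    repeat' apply And.intro
    all_goals u_omega
  have e_rbx : s_106ae7.reg .rbx = v.reg .rbx := w_kept .rbx rfl
  have e_r15 : s_106ae7.reg .r15 = v.reg .r15 := w_kept .r15 rfl
  refine ReachVia.done ⟨⟨w_rip, ⟨⟨he0, hpre0, w_eq, ?abi, ⟨w_rsp, q0, q15, q14, q13, q12, qbp, qbx⟩, ?same, hU2⟩, hle, ?z, ?base⟩, htlt, ?r12⟩, ?rdi⟩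
  case abi => v_inv
  case z =>
    rw [e_rbx]
    exact hz
  case base =>
    rw [e_r15]
    exact hbase
  case r12 =>
    rw [w_r12, e_rbx]
  case rdi =>
    rw [w_rdi, e_rbx]
  case same =>
    simp only [X86.User.Spec.footprint, vspec]
    exact hsameR

/-- **Part B** (0x106aeb … 0x106c3b, C lines 2637-2650): the loads `z[-4 .. -7]`, `z[-12 .. -15]` with their eight checks, the last
four butterflies and their eight stores, `iter_54(z)`; up to the return of that call. -/
theorem partB {Lay : Layout} (hLay : Lay.hi = 0x1000000) {μ : Microarch} (hμ : UserX.MicroOK μ) {u₀ : State}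
    (hcode : HasCodeNat Lay u₀ Vorbis.L.imdct_step3_inner_s_loop_ld654.entry Vorbis.Code.code_imdct_step3_inner_s_loop_ld654.nat Vorbis.L.imdct_step3_inner_s_loop_ld654.size)
    (hload4 : Asan.SmallCheck Lay μ Vorbis.WayInv (Vorbis.CodeOK u₀) [.rax, .rcx, .rdx] 4 Vorbis.L.__asan_load4_noabort.entry)
    {others : List Obj} {frames : List (Nat × FrameLayout)}
    (hiter' : Calls Lay μ Vorbis.WayInv (Vorbis.conv u₀) Vorbis.L.iter_54.entry (Vorbis.Spec.iter_54.spec others frames))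
    {len i0 : Nat} {ue : State} {ret : Word} {t : Nat} {v : State}
    (hv : MidBody u₀ others frames len i0 ue ret t Vorbis.L.imdct_step3_inner_s_loop_ld654.chk10 v)
    (hrdi : v.reg .rdi = v.reg .rbx - 16) :
    ReachVia Lay μ WayInv v (fun w => MidBody u₀ others frames len i0 ue ret t Vorbis.L.imdct_step3_inner_s_loop_ld654.cut2 w) := by
  obtain ⟨hrip, hloop, htlt, hr12⟩ := hv
  obtain ⟨hbody, hle, hz, hbase⟩ := hloop
  obtain ⟨he, hpre, hcodeok, habi, hframe, hsame, hshadow⟩ := hbody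
  obtain ⟨hrsp, sret, s15, s14, s13, s12, sbp, sbx⟩ := hframe
  have he0 := he
  have hpre0 := hpre
  v_entry he
  obtain ⟨hsh, h16, hi0, hr8, hrun, hlen, hlive, hA⟩ := hpre
  have hsp := hsh.rsp
  have w_rip := hrip
  have w_rsp := hrsp
  have w_eq : Mem.EqOn Vorbis.L.textLo Vorbis.L.textHi u₀.mem v.mem := hcodeok
  have hdf := habi.1
  have hmx := habi.2
  have hsse : SseOK v := sseOK_of_abiInv habi
  simp only [X86.User.Spec.footprint, vspec] at hsame
  have hwhere := hlive.where_ hsh.inv hsh.offText (by omega) (by omega)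
  have htlt' := htlt
  rw [arg32_def] at htlt'
  have hrun' := hrun
  rw [arg32_def] at hrun'
  have w_r12 := hr12
  have w_rdi := hrdi
  u_walk hcode [hμ.vendor] until [Vorbis.L.imdct_step3_inner_s_loop_ld654.ret10] span [Vorbis.L.textLo, Vorbis.L.textHi] side (v_side)
  · refine chk_z hsh hlive hshadow ?_ hz htlt hrun hlen _ 4 (by decide) (by u_omega)
    v_untouched
  try clear w_zmm
  u_walk hcode [hμ.vendor] until [Vorbis.L.imdct_step3_inner_s_loop_ld654.ret11] span [Vorbis.L.textLo, Vorbis.L.textHi] side (v_side)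
  · refine chk_z hsh hlive hshadow ?_ hz htlt hrun hlen _ 12 (by decide) (by u_omega)
    v_untouched
  try clear w_zmm
  u_walk hcode [hμ.vendor] until [Vorbis.L.imdct_step3_inner_s_loop_ld654.ret12] span [Vorbis.L.textLo, Vorbis.L.textHi] side (v_side)
  · refine chk_z hsh hlive hshadow ?_ hz htlt hrun hlen _ 5 (by decide) (by u_omega)
    v_untouched
  try clear w_zmm
  u_walk hcode [hμ.vendor] until [Vorbis.L.imdct_step3_inner_s_loop_ld654.ret13] span [Vorbis.L.textLo, Vorbis.L.textHi] side (v_side)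
  · refine chk_z hsh hlive hshadow ?_ hz htlt hrun hlen _ 13 (by decide) (by u_omega)
    v_untouched
  try clear w_zmm
  u_walk hcode [hμ.vendor] until [Vorbis.L.imdct_step3_inner_s_loop_ld654.ret14] span [Vorbis.L.textLo, Vorbis.L.textHi] side (v_side)
  · refine chk_z hsh hlive hshadow ?_ hz htlt hrun hlen _ 6 (by decide) (by u_omega)
    v_untouched
  try clear w_zmm
  -- 0x106b5f: the memory so far, abstracted to its footprint (the integer load that follows need not read through the nest)
  have hS1 : Mem.SameExcept [⟨(ue.reg .rsp).toNat - 176, (ue.reg .rsp).toNat - 56⟩,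
      ⟨(v.reg .rbx).toNat - 60, (v.reg .rbx).toNat + 4⟩] v.mem s_106b5ar.mem := by
    u_same
  have hU1 : ShadowUntouched ue.mem s_106b5ar.mem := by
    have h1 : ShadowUntouched v.mem s_106b5ar.mem := by v_untouched
    exact Mem.EqOn.trans hshadow h1
  clear w_mem
  u_walk hcode [hμ.vendor] until [Vorbis.L.imdct_step3_inner_s_loop_ld654.ret15] span [Vorbis.L.textLo, Vorbis.L.textHi] side (v_side)
  · refine chk_z hsh hlive hU1 ?_ hz htlt hrun hlen _ 14 (by decide) (by u_omega)
    v_untouched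
  try clear w_zmm
  u_walk hcode [hμ.vendor] until [Vorbis.L.imdct_step3_inner_s_loop_ld654.ret16] span [Vorbis.L.textLo, Vorbis.L.textHi] side (v_side)
  · refine chk_z hsh hlive hU1 ?_ hz htlt hrun hlen _ 7 (by decide) (by u_omega)
    v_untouched
  try clear w_zmm
  -- 0x106b8f: the same, before the second integer load
  have hS2 : Mem.SameExcept [⟨(ue.reg .rsp).toNat - 176, (ue.reg .rsp).toNat - 56⟩,
      ⟨(v.reg .rbx).toNat - 60, (v.reg .rbx).toNat + 4⟩] v.mem s_106b8ar.mem := by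
    u_same
  have hU2 : ShadowUntouched ue.mem s_106b8ar.mem := by
    have h1 : ShadowUntouched s_106b5ar.mem s_106b8ar.mem := by v_untouched
    exact Mem.EqOn.trans hU1 h1
  clear w_mem hS1
  u_walk hcode [hμ.vendor] until [Vorbis.L.imdct_step3_inner_s_loop_ld654.ret17] span [Vorbis.L.textLo, Vorbis.L.textHi] side (v_side)
  · refine chk_z hsh hlive hU2 ?_ hz htlt hrun hlen _ 15 (by decide) (by u_omega)
    v_untouched
  try clear w_zmm
  u_walk hcode [hμ.vendor] until [Vorbis.L.imdct_step3_inner_s_loop_ld654.cut2] span [Vorbis.L.textLo, Vorbis.L.textHi] side (v_side)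
  case call_inv => v_inv
  case pre_106c36 =>
    refine ⟨hsh.callee ?_ ?_ ?_ ?_, ?_, ?_⟩
    · have h1 : ShadowUntouched s_106b8ar.mem s_106c36.mem := by v_untouched
      exact Mem.EqOn.trans hU2 h1
    · rw [w_rsp]
      u_omega
    · rw [w_rsp]
      u_omega
    · rw [w_rsp]
      u_omega
    · rw [w_rdi]
      u_omega
    · rw [w_rdi]
      exact hlive.sub _ 32 (by u_omega) (by u_omega)
  -- 0x106c3b: after `iter_54(z)`
  v_after_call w_rsp_106c36 w_mem_106c36
  simp only [w_rdi_106c36] at w_same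
  have hS3 : Mem.SameExcept [⟨(ue.reg .rsp).toNat - 176, (ue.reg .rsp).toNat - 56⟩,
      ⟨(v.reg .rbx).toNat - 60, (v.reg .rbx).toNat + 4⟩] v.mem s_106c36r.mem := by
    u_same
  have hU3 : ShadowUntouched ue.mem s_106c36r.mem := by
    have h1 : ShadowUntouched s_106b8ar.mem s_106c36.mem := by
      rw [w_mem_106c36]
      v_untouched
    have h2 : ShadowUntouched s_106c36.mem s_106c36r.mem := w_post
    exact Mem.EqOn.trans hU2 (Mem.EqOn.trans h1 h2)
  clear w_same w_mem_106c36 hS2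
  have q0 : UInt64.ofNat (s_106c36r.mem.readLE (ue.reg .rsp) 8) = ret := by u_frame sret
  have q15 : UInt64.ofNat (s_106c36r.mem.readLE (ue.reg .rsp - 8) 8) = ue.reg .r15 := by u_frame s15
  have q14 : UInt64.ofNat (s_106c36r.mem.readLE (ue.reg .rsp - 16) 8) = ue.reg .r14 := by u_frame s14
  have q13 : UInt64.ofNat (s_106c36r.mem.readLE (ue.reg .rsp - 24) 8) = ue.reg .r13 := by u_frame s13
  have q12 : UInt64.ofNat (s_106c36r.mem.readLE (ue.reg .rsp - 32) 8) = ue.reg .r12 := by u_frame s12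
  have qbp : UInt64.ofNat (s_106c36r.mem.readLE (ue.reg .rsp - 40) 8) = ue.reg .rbp := by u_frame sbp
  have qbx : UInt64.ofNat (s_106c36r.mem.readLE (ue.reg .rsp - 48) 8) = ue.reg .rbx := by u_frame sbx
  have hsameR : Mem.SameExcept
      [⟨(ue.reg .rsp).toNat - 176, (ue.reg .rsp).toNat⟩,
       ⟨(ue.reg .rsi).toNat + 4 * (i0 + 1 - 16 * ((ue.reg .rdi).toNat % 2 ^ 32)), (ue.reg .rsi).toNat + 4 * (i0 + 1)⟩]
      ue.mem s_106c36r.mem := by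
    refine Mem.SameExcept.step_same' hsame hS3 ?_
    simp only [List.forall_mem_cons, List.not_mem_nil, false_imp_iff, implies_true, and_true, X86.User.inSpans_cons,
      X86.User.inSpans_nil, or_false]
    clear hwhere
    repeat' apply And.intro
    all_goals u_omega
  have e_rbx : s_106c36r.reg .rbx = v.reg .rbx := w_kept .rbx rfl
  have e_r15 : s_106c36r.reg .r15 = v.reg .r15 := w_kept .r15 rfl
  have e_r12 : s_106c36r.reg .r12 = v.reg .r12 := w_kept .r12 rfl
  refine ReachVia.done ⟨w_rip, ⟨⟨he0, hpre0, w_eq, w_inv, ⟨w_rsp, q0, q15, q14, q13, q12, qbp, qbx⟩, ?same, hU3⟩, hle, ?z, ?base⟩, htlt, ?r12⟩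
  case z =>
    rw [e_rbx]
    exact hz
  case base =>
    rw [e_r15]
    exact hbase
  case r12 =>
    rw [e_r12, e_rbx]
    exact hr12
  case same =>
    simp only [X86.User.Spec.footprint, vspec]
    exact hsameR

/-- **Part C** (0x106c3b … 0x106c47, C lines 2651-2652): `iter_54(z - 8)`, `z -= 16`; back to the loop head with `t + 1`. -/
theorem partC {Lay : Layout} (hLay : Lay.hi = 0x1000000) {μ : Microarch} (hμ : UserX.MicroOK μ) {u₀ : State}
    (hcode : HasCodeNat Lay u₀ Vorbis.L.imdct_step3_inner_s_loop_ld654.entry Vorbis.Code.code_imdct_step3_inner_s_loop_ld654.nat Vorbis.L.imdct_step3_inner_s_loop_ld654.size)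
    {others : List Obj} {frames : List (Nat × FrameLayout)}
    (hiter' : Calls Lay μ Vorbis.WayInv (Vorbis.conv u₀) Vorbis.L.iter_54.entry (Vorbis.Spec.iter_54.spec others frames))
    {len i0 : Nat} {ue : State} {ret : Word} {t : Nat} {v : State}
    (hv : MidBody u₀ others frames len i0 ue ret t Vorbis.L.imdct_step3_inner_s_loop_ld654.cut2 v) :
    ReachVia Lay μ WayInv v (fun w => imdct_step3_inner_s_loop_ld654.AtHead u₀ others frames len i0 ue ret (t + 1) w) := by
  obtain ⟨hrip, hloop, htlt, hr12⟩ := hv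
  obtain ⟨hbody, hle, hz, hbase⟩ := hloop
  obtain ⟨he, hpre, hcodeok, habi, hframe, hsame, hshadow⟩ := hbody
  obtain ⟨hrsp, sret, s15, s14, s13, s12, sbp, sbx⟩ := hframe
  have he0 := he
  have hpre0 := hpre
  v_entry he
  obtain ⟨hsh, h16, hi0, hr8, hrun, hlen, hlive, hA⟩ := hpre
  have hsp := hsh.rsp
  have w_rip := hrip
  have w_rsp := hrsp
  have w_eq : Mem.EqOn Vorbis.L.textLo Vorbis.L.textHi u₀.mem v.mem := hcodeok
  have hdf := habi.1
  have hmx := habi.2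
  have hsse : SseOK v := sseOK_of_abiInv habi
  simp only [X86.User.Spec.footprint, vspec] at hsame
  have hwhere := hlive.where_ hsh.inv hsh.offText (by omega) (by omega)
  have htlt' := htlt
  rw [arg32_def] at htlt'
  have hrun' := hrun
  rw [arg32_def] at hrun'
  have w_r12 := hr12
  u_walk hcode [hμ.vendor] until [Vorbis.L.imdct_step3_inner_s_loop_ld654.loop1] span [Vorbis.L.textLo, Vorbis.L.textHi] side (v_side)
  case call_inv => v_inv
  case pre_106c3e =>
    refine ⟨hsh.callee ?_ ?_ ?_ ?_, ?_, ?_⟩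
    · have h1 : ShadowUntouched v.mem s_106c3e.mem := by v_untouched
      exact Mem.EqOn.trans hshadow h1
    · rw [w_rsp]
      u_omega
    · rw [w_rsp]
      u_omega
    · rw [w_rsp]
      u_omega
    · rw [w_rdi]
      u_omega
    · rw [w_rdi]
      exact hlive.sub _ 32 (by u_omega) (by u_omega)
  -- 0x106c43: after `iter_54(z - 8)`
  v_after_call w_rsp_106c3e w_mem_106c3e
  simp only [w_rdi_106c3e] at w_same
  have hS : Mem.SameExcept [⟨(ue.reg .rsp).toNat - 176, (ue.reg .rsp).toNat - 56⟩,
      ⟨(v.reg .rbx).toNat - 60, (v.reg .rbx).toNat + 4⟩] v.mem s_106c3er.mem := by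
    u_same
  have hU : ShadowUntouched ue.mem s_106c3er.mem := by
    have h1 : ShadowUntouched v.mem s_106c3e.mem := by
      rw [w_mem_106c3e]
      v_untouched
    have h2 : ShadowUntouched s_106c3e.mem s_106c3er.mem := w_post
    exact Mem.EqOn.trans hshadow (Mem.EqOn.trans h1 h2)
  clear w_same w_mem_106c3e
  have q0 : UInt64.ofNat (s_106c3er.mem.readLE (ue.reg .rsp) 8) = ret := by u_frame sret
  have q15 : UInt64.ofNat (s_106c3er.mem.readLE (ue.reg .rsp - 8) 8) = ue.reg .r15 := by u_frame s15
  have q14 : UInt64.ofNat (s_106c3er.mem.readLE (ue.reg .rsp - 16) 8) = ue.reg .r14 := by u_frame s14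
  have q13 : UInt64.ofNat (s_106c3er.mem.readLE (ue.reg .rsp - 24) 8) = ue.reg .r13 := by u_frame s13
  have q12 : UInt64.ofNat (s_106c3er.mem.readLE (ue.reg .rsp - 32) 8) = ue.reg .r12 := by u_frame s12
  have qbp : UInt64.ofNat (s_106c3er.mem.readLE (ue.reg .rsp - 40) 8) = ue.reg .rbp := by u_frame sbp
  have qbx : UInt64.ofNat (s_106c3er.mem.readLE (ue.reg .rsp - 48) 8) = ue.reg .rbx := by u_frame sbx
  have hsameR : Mem.SameExcept
      [⟨(ue.reg .rsp).toNat - 176, (ue.reg .rsp).toNat⟩,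
       ⟨(ue.reg .rsi).toNat + 4 * (i0 + 1 - 16 * ((ue.reg .rdi).toNat % 2 ^ 32)), (ue.reg .rsi).toNat + 4 * (i0 + 1)⟩]
      ue.mem s_106c3er.mem := by
    refine Mem.SameExcept.step_same' hsame hS ?_
    simp only [List.forall_mem_cons, List.not_mem_nil, false_imp_iff, implies_true, and_true, X86.User.inSpans_cons,
      X86.User.inSpans_nil, or_false]
    clear hwhere
    repeat' apply And.intro
    all_goals u_omega
  -- 0x106c43  z -= 16   (C 2652)
  u_walk hcode [hμ.vendor] until [Vorbis.L.imdct_step3_inner_s_loop_ld654.loop1] span [Vorbis.L.textLo, Vorbis.L.textHi] side (v_side)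
  -- 0x106c47: the loop head, `t + 1` iterations done
  have e_r15 : s_106c43.reg .r15 = v.reg .r15 := w_kept .r15 rfl
  refine ReachVia.done ⟨w_rip, ⟨he0, hpre0, w_eq, ?abi, ⟨w_rsp, ?_, ?_, ?_, ?_, ?_, ?_, ?_⟩, ?same, ?shadow⟩, ?le, ?z, ?base⟩
  case abi => v_inv
  case le => omega
  case z =>
    rw [w_rbx]
    u_omega
  case base =>
    rw [e_r15]
    exact hbase
  case same =>
    simp only [X86.User.Spec.footprint, vspec]
    rw [w_mem]
    exact hsameR
  case shadow =>
    rw [w_mem]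
    exact hU
  · rw [w_mem]
    exact q0
  · rw [w_mem]
    exact q15
  · rw [w_mem]
    exact q14
  · rw [w_mem]
    exact q13
  · rw [w_mem]
    exact q12
  · rw [w_mem]
    exact qbp
  · rw [w_mem]
    exact qbx

end Vorbis.Spec.imdct_step3_inner_s_loop_ld654_2
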